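-- pv_equiv track=rewrite | github.com/xCiaraG/Kattis | juryjeopardy.py | make_maze
-- ===== SOURCE A (Python) =====
-- def make_maze(line):
-- 	direction, x, y, maze = "east", 0, 0, [["."]]
-- 	for d in line:
-- 		if d == "R":
-- 			direction = right[direction]
-- 		elif d == "B":
-- 			direction = reverse[direction]
-- 		elif d == "L":
-- 			direction = right[reverse[direction]]
--
-- 		if direction == "east":
-- 			y += 1
-- 		elif direction == "west":
-- 			y -= 1
-- 		elif direction == "north":
-- 			x -= 1
-- 		else:
-- 			x += 1
--
-- 		if x == -1:
-- 			x = 0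
-- 			maze = [["#"]*len(maze[0])] + maze
-- 		elif x >= len(maze):
-- 			maze.append(["#"]*len(maze[0]))
-- 		elif y == -1:
-- 			y = 0
-- 			i = 0
-- 			while i  < len(maze):
-- 				maze[i] = ["#"] + maze[i]
-- 				i += 1
-- 		elif y >= len(maze[0]):
-- 			i = 0
-- 			while i < len(maze):
-- 				maze[i].append("#")
-- 				i += 1
-- 		maze[x][y] = "."
-- 	return maze
--
-- right = {"east":"south", "south":"west", "west":"north", "north":"east"}
--
-- reverse = {"north":"south", "south":"north", "east":"west", "west":"east"}
-- ===== SOURCE B (Python) =====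
-- def make_maze(line):
--     # one pass to record visited positions, then allocate the bounding-box grid once and fill it
--     TURN = {"R": 1, "B": 2, "L": 3}
--     DX = (0, 1, 0, -1)   # east, south, west, north
--     DY = (1, 0, -1, 0)
--     d, x, y = 0, 0, 0
--     minx = maxx = miny = maxy = 0
--     pts = [(0, 0)]
--     for c in line:
--         d = (d + TURN.get(c, 0)) % 4
--         x += DX[d]
--         y += DY[d]
--         pts.append((x, y))
--         minx = min(minx, x); maxx = max(maxx, x)
--         miny = min(miny, y); maxy = max(maxy, y)
--     grid = [["#"] * (maxy - miny + 1) for _ in range(maxx - minx + 1)]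
--     for (px, py) in pts:
--         grid[px - minx][py - miny] = "."
--     return grid
-- ===== Notes on version B (the rewrite author's own statement) =====
-- stated objective: alternative
-- what changed: A grows the maze while walking, inserting/appending whole rows and columns whenever the walk crosses the current boundary; B does one pass recording the visited positions and the bounding box, then allocates the full grid once and fills the visited cells.
import Mathlib
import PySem

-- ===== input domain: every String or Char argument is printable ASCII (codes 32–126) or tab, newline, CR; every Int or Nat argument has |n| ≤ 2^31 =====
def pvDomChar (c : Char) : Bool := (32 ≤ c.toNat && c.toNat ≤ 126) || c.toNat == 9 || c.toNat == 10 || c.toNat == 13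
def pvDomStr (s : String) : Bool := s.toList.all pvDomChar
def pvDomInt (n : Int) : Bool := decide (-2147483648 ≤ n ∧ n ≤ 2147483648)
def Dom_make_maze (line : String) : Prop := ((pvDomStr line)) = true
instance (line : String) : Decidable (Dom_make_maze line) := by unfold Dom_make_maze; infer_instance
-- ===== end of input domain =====

-- B replaces A's grow-the-grid-while-walking simulation with one pass that records all visited
-- positions and their bounding box, then allocates the grid once and fills it (objective: alternative).

-- ===== PORT A =====
def pyRight : PySem.Dict String String :=
  PySem.Dict.ofList [("east","south"),("south","west"),("west","north"),("north","east")]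
def pyReverse : PySem.Dict String String :=
  PySem.Dict.ofList [("north","south"),("south","north"),("east","west"),("west","east")]

def stepA (st : String × Int × Int × List (List String)) (d : Char) :
    String × Int × Int × List (List String) :=
  let direction := st.1
  let x := st.2.1
  let y := st.2.2.1
  let maze := st.2.2.2
  let direction :=
    if d = 'R' then PySem.Dict.getD pyRight direction ""
    else if d = 'B' then PySem.Dict.getD pyReverse direction ""
    else if d = 'L' then PySem.Dict.getD pyRight (PySem.Dict.getD pyReverse direction "") ""
    else direction
  let xy : Int × Int :=
    if direction = "east" then (x, y + 1)
    else if direction = "west" then (x, y - 1)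
    else if direction = "north" then (x - 1, y)
    else (x + 1, y)
  let x := xy.1
  let y := xy.2
  let xym : Int × Int × List (List String) :=
    if x = -1 then
      (0, y, List.replicate (PySem.List.pyGetD maze 0 []).length "#" :: maze)
    else if x ≥ (maze.length : Int) then
      (x, y, maze ++ [List.replicate (PySem.List.pyGetD maze 0 []).length "#"])
    else if y = -1 then
      (x, 0, maze.map (fun row => "#" :: row))   -- the index-while loop prepends "#" to every row
    else if y ≥ ((PySem.List.pyGetD maze 0 []).length : Int) then
      (x, y, maze.map (fun row => row ++ ["#"])) -- the index-while loop appends "#" to every row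
    else (x, y, maze)
  let x := xym.1
  let y := xym.2.1
  let maze := xym.2.2
  let maze := PySem.List.pySetD maze x (PySem.List.pySetD (PySem.List.pyGetD maze x []) y ".")
  (direction, x, y, maze)

def make_maze (line : String) : List (List String) :=
  (line.toList.foldl stepA ("east", 0, 0, [["."]])).2.2.2

-- ===== PORT B =====
-- ===== PORT B =====
def pyTurnB : PySem.Dict String Int :=
  PySem.Dict.ofList [("R",1),("B",2),("L",3)]
def dxB : List Int := [0, 1, 0, -1]   -- east, south, west, north
def dyB : List Int := [1, 0, -1, 0]

structure BState where
  d : Int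
  x : Int
  y : Int
  minx : Int
  maxx : Int
  miny : Int
  maxy : Int
  pts : List (Int × Int)
deriving Repr, DecidableEq

def stepB (st : BState) (c : Char) : BState :=
  let d := PySem.Int.mod (st.d + PySem.Dict.getD pyTurnB (String.ofList [c]) 0) 4
  let x := st.x + PySem.List.pyGetD dxB d 0
  let y := st.y + PySem.List.pyGetD dyB d 0
  { d := d, x := x, y := y,
    minx := min st.minx x, maxx := max st.maxx x,
    miny := min st.miny y, maxy := max st.maxy y,
    pts := st.pts ++ [(x, y)] }

def initB : BState := ⟨0, 0, 0, 0, 0, 0, 0, [(0, 0)]⟩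

def scanB (cs : List Char) : BState := cs.foldl stepB initB

def fillB (minx miny : Int) (pts : List (Int × Int)) (g : List (List String)) :
    List (List String) :=
  pts.foldl (fun g p =>
    PySem.List.pySetD g (p.1 - minx)
      (PySem.List.pySetD (PySem.List.pyGetD g (p.1 - minx) []) (p.2 - miny) ".")) g

def make_maze_alt (line : String) : List (List String) :=
  let st := scanB line.toList
  fillB st.minx st.miny st.pts
    (List.replicate (st.maxx - st.minx + 1).toNat
      (List.replicate (st.maxy - st.miny + 1).toNat "#"))

-- ===== PRECONDITION & SPEC =====
def Spec_make_maze (line : String) (out : List (List String)) : Prop := out = make_maze_alt line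
instance (line : String) (out : List (List String)) : Decidable (Spec_make_maze line out) := by unfold Spec_make_maze; infer_instance

-- ===== CLAIM (what is proved, stated in full; the proofs are below) =====
def Claim_equal_make_maze : Prop := ∀ (line : String), Dom_make_maze line → Spec_make_maze line (make_maze line)

-- ===== LEMMAS AND PROOFS =====
def turnN (c : Char) : Int := if c = 'R' then 1 else if c = 'B' then 2 else if c = 'L' then 3 else 0
def dxN (d : Int) : Int := if d = 1 then 1 else if d = 3 then -1 else 0
def dyN (d : Int) : Int := if d = 0 then 1 else if d = 2 then -1 else 0
def dirName (d : Int) : String :=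
  if d = 0 then "east" else if d = 1 then "south" else if d = 2 then "west" else "north"

lemma scanB_append (cs : List Char) (c : Char) : scanB (cs ++ [c]) = stepB (scanB cs) c := by
  simp [scanB, List.foldl_append]

lemma turnD (c : Char) : PySem.Dict.getD pyTurnB (String.ofList [c]) 0 = turnN c := by
  by_cases hR : c = 'R'
  · subst hR; decide
  by_cases hB : c = 'B'
  · subst hB; decide
  by_cases hL : c = 'L'
  · subst hL; decide
  have hne : ∀ (a : Char), c ≠ a → String.ofList [c] ≠ String.ofList [a] := by
    intro a ha h
    have := congrArg String.toList h
    simp at this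
    exact ha this
  rw [PySem.Dict.getD_of_not_contains, turnN]
  · simp [hR, hB, hL]
  · rw [PySem.Dict.contains_mk]
    have e1 : ("R" == String.ofList [c]) = false := by
      simp [beq_eq_false_iff_ne]; exact fun h => hne 'R' hR (by simpa using h.symm)
    have e2 : ("B" == String.ofList [c]) = false := by
      simp [beq_eq_false_iff_ne]; exact fun h => hne 'B' hB (by simpa using h.symm)
    have e3 : ("L" == String.ofList [c]) = false := by
      simp [beq_eq_false_iff_ne]; exact fun h => hne 'L' hL (by simpa using h.symm)
    have hit : pyTurnB.items = [("R",(1:Int)),("B",2),("L",3)] := by decide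
    rw [hit]
    simp [e1, e2, e3]

lemma pyGetD_dx (d : Int) (h0 : 0 ≤ d) (h4 : d < 4) : PySem.List.pyGetD dxB d 0 = dxN d := by
  have h : d = 0 ∨ d = 1 ∨ d = 2 ∨ d = 3 := by omega
  rcases h with h|h|h|h <;> subst h <;> decide

lemma pyGetD_dy (d : Int) (h0 : 0 ≤ d) (h4 : d < 4) : PySem.List.pyGetD dyB d 0 = dyN d := by
  have h : d = 0 ∨ d = 1 ∨ d = 2 ∨ d = 3 := by omega
  rcases h with h|h|h|h <;> subst h <;> decide

-- clean form of stepB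
lemma stepB_eq (st : BState) (c : Char) (h0 : 0 ≤ st.d) (h4 : st.d < 4) :
    stepB st c =
      let d := PySem.Int.mod (st.d + turnN c) 4
      let x := st.x + dxN d
      let y := st.y + dyN d
      ⟨d, x, y, min st.minx x, max st.maxx x, min st.miny y, max st.maxy y, st.pts ++ [(x, y)]⟩ := by
  have hd0 : 0 ≤ PySem.Int.mod (st.d + turnN c) 4 := PySem.Int.mod_nonneg _ (by norm_num)
  have hd4 : PySem.Int.mod (st.d + turnN c) 4 < 4 := PySem.Int.mod_lt _ (by norm_num)
  simp only [stepB, turnD, pyGetD_dx _ hd0 hd4, pyGetD_dy _ hd0 hd4]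

def InvB (st : BState) : Prop :=
  0 ≤ st.d ∧ st.d < 4 ∧
  st.minx ≤ 0 ∧ 0 ≤ st.maxx ∧ st.miny ≤ 0 ∧ 0 ≤ st.maxy ∧
  (st.x, st.y) ∈ st.pts ∧
  (∀ p ∈ st.pts, st.minx ≤ p.1 ∧ p.1 ≤ st.maxx ∧ st.miny ≤ p.2 ∧ p.2 ≤ st.maxy)

lemma inv_scanB (cs : List Char) : InvB (scanB cs) := by
  induction cs using List.reverseRecOn with
  | nil => simp [scanB, initB, InvB]
  | append_singleton cs c ih =>
    rw [scanB_append]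
    obtain ⟨h0, h4, hmn, hmx, hny, hxy, hmem, hb⟩ := ih
    rw [stepB_eq _ _ h0 h4]
    have hd0 : 0 ≤ PySem.Int.mod ((scanB cs).d + turnN c) 4 := PySem.Int.mod_nonneg _ (by norm_num)
    have hd4 : PySem.Int.mod ((scanB cs).d + turnN c) 4 < 4 := PySem.Int.mod_lt _ (by norm_num)
    refine ⟨hd0, hd4, by simp; omega, by simp; omega, by simp; omega, by simp; omega, by simp, ?_⟩
    intro p hp
    simp only [List.mem_append, List.mem_singleton] at hp
    rcases hp with h | h
    · have := hb _ h
      refine ⟨?_, ?_, ?_, ?_⟩ <;> simp <;> omega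
    · subst h
      refine ⟨?_, ?_, ?_, ?_⟩ <;> simp

lemma dir_step (d : Int) (c : Char) (h0 : 0 ≤ d) (h4 : d < 4) :
    (if c = 'R' then PySem.Dict.getD pyRight (dirName d) ""
     else if c = 'B' then PySem.Dict.getD pyReverse (dirName d) ""
     else if c = 'L' then PySem.Dict.getD pyRight (PySem.Dict.getD pyReverse (dirName d) "") ""
     else dirName d) = dirName (PySem.Int.mod (d + turnN c) 4) := by
  have h : d = 0 ∨ d = 1 ∨ d = 2 ∨ d = 3 := by omega
  by_cases hR : c = 'R'
  · subst hR; rcases h with rfl|rfl|rfl|rfl <;> decide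
  by_cases hB : c = 'B'
  · subst hB; simp [hR]; rcases h with rfl|rfl|rfl|rfl <;> decide
  by_cases hL : c = 'L'
  · subst hL; simp [hR, hB]; rcases h with rfl|rfl|rfl|rfl <;> decide
  · simp [hR, hB, hL, turnN]; rcases h with rfl|rfl|rfl|rfl <;> decide

lemma move_step (d : Int) (h0 : 0 ≤ d) (h4 : d < 4) (x y : Int) :
    (if dirName d = "east" then (x, y + 1)
     else if dirName d = "west" then (x, y - 1)
     else if dirName d = "north" then (x - 1, y)
     else (x + 1, y)) = (x + dxN d, y + dyN d) := by
  have h : d = 0 ∨ d = 1 ∨ d = 2 ∨ d = 3 := by omega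
  rcases h with rfl|rfl|rfl|rfl <;> simp [dirName, dxN, dyN] <;> omega

def setCell (g : List (List String)) (x y : Int) : List (List String) :=
  PySem.List.pySetD g x (PySem.List.pySetD (PySem.List.pyGetD g x []) y ".")

def rowOf (mny mxy : Int) (pts : List (Int × Int)) (i : Int) : List String :=
  (PySem.List.pyRange mny (mxy + 1) 1).map (fun j => if (i, j) ∈ pts then "." else "#")

def grid (mnx mxx mny mxy : Int) (pts : List (Int × Int)) : List (List String) :=
  (PySem.List.pyRange mnx (mxx + 1) 1).map (rowOf mny mxy pts)

lemma pyGetD_map_pyRange_int {α : Type} (f : Int → α) (a b i : Int) (d : α)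
    (h0 : 0 ≤ i) (h : i < b - a) :
    PySem.List.pyGetD ((PySem.List.pyRange a b 1).map f) i d = f (a + i) := by
  rw [PySem.List.pyGetD_eq_getElem _ _ h0
    (by simp [PySem.List.length_pyRange_one]; omega)]
  rw [List.getElem_map, PySem.List.getElem_pyRange_one]
  congr 1; omega

lemma map_pyRange_set {α : Type} (f g : Int → α) (a b t : Int) (v : α) (h0 : a ≤ t) (h : t < b)
    (hv : f t = v)
    (hfg : ∀ z, a ≤ z → z < b → z ≠ t → f z = g z) :
    ((PySem.List.pyRange a b 1).map g).set (t - a).toNat v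
      = (PySem.List.pyRange a b 1).map f := by
  apply List.ext_getElem (by simp)
  intro i h1 h2
  have hlen : i < (b - a).toNat := by
    simpa [PySem.List.length_pyRange_one] using h2
  simp only [List.getElem_set, List.getElem_map, PySem.List.getElem_pyRange_one]
  by_cases hi : (t - a).toNat = i
  · rw [if_pos hi, ← hv]; congr 1; omega
  · rw [if_neg hi]
    exact (hfg (a + i) (by omega) (by omega) (by omega)).symm

lemma set_append_last {α : Type} (l : List α) (a b : α) :
    (l ++ [a]).set l.length b = l ++ [b] := by
  apply List.ext_getElem (by simp)
  intro i h1 h2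
  simp only [List.getElem_set]
  by_cases hi : l.length = i
  · subst hi; simp
  · simp at h1
    have hil : i < l.length := by omega
    rw [if_neg hi, List.getElem_append_left hil, List.getElem_append_left hil]

lemma rep_row (a b : Int) : List.replicate (b - a).toNat "#"
    = (PySem.List.pyRange a b 1).map (fun _ => "#") := by
  rw [List.map_const', PySem.List.length_pyRange_one]

lemma length_grid (mnx mxx mny mxy : Int) (pts : List (Int × Int)) :
    (grid mnx mxx mny mxy pts).length = (mxx + 1 - mnx).toNat := by
  simp [grid, PySem.List.length_pyRange_one]

lemma length_rowOf (mny mxy : Int) (pts : List (Int × Int)) (i : Int) :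
    (rowOf mny mxy pts i).length = (mxy + 1 - mny).toNat := by
  simp [rowOf, PySem.List.length_pyRange_one]

lemma grid_row0_len (mnx mxx mny mxy : Int) (pts : List (Int × Int)) (hxx : mnx ≤ mxx) :
    (PySem.List.pyGetD (grid mnx mxx mny mxy pts) 0 []).length = (mxy + 1 - mny).toNat := by
  rw [grid, pyGetD_map_pyRange_int _ _ _ _ _ (by omega) (by omega), length_rowOf]

-- rows unaffected by the new point
lemma rowOf_away (mny mxy px py i : Int) (pts : List (Int × Int)) (hi : i ≠ px) :
    rowOf mny mxy (pts ++ [(px, py)]) i = rowOf mny mxy pts i := by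
  apply List.map_congr_left
  intro j _
  have : (i, j) ∈ pts ++ [(px, py)] ↔ (i, j) ∈ pts := by
    simp only [List.mem_append, List.mem_singleton, Prod.mk.injEq]
    exact or_iff_left (fun h => hi h.1)
  simp only [this]

-- the all-new row created by an x-expansion
lemma rowOf_new (mnx mny mxy px py : Int) (pts : List (Int × Int))
    (hb : ∀ q ∈ pts, q.1 ≠ px) (hpy1 : mny ≤ py) (hpy2 : py ≤ mxy) :
    (List.replicate (mxy + 1 - mny).toNat "#").set (py - mny).toNat "."
      = rowOf mny mxy (pts ++ [(px, py)]) px := by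
  rw [rep_row mny (mxy + 1), rowOf]
  apply map_pyRange_set _ _ _ _ _ _ (by omega) (by omega) (by simp)
  intro z _ _ hz
  have : (px, z) ∈ pts ++ [(px, py)] ↔ False := by
    simp only [List.mem_append, List.mem_singleton, Prod.mk.injEq, iff_false]
    rintro (h | ⟨-, rfl⟩)
    · exact hb _ h rfl
    · exact hz rfl
  simp only [this, if_false]

lemma grid_up (mnx mxx mny mxy px py : Int) (pts : List (Int × Int))
    (hb : ∀ q ∈ pts, mnx ≤ q.1 ∧ q.1 ≤ mxx ∧ mny ≤ q.2 ∧ q.2 ≤ mxy)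
    (hxx : mnx ≤ mxx) (hpx : px = mnx - 1) (hpy1 : mny ≤ py) (hpy2 : py ≤ mxy) :
    setCell (List.replicate (mxy + 1 - mny).toNat "#"
        :: grid mnx mxx mny mxy pts) 0 (py - mny)
      = grid (mnx - 1) mxx mny mxy (pts ++ [(px, py)]) := by
  rw [setCell,
    PySem.List.pyGetD_zero, List.getD_cons_zero,
    PySem.List.pySetD_of_nonneg _ _ (by omega : (0:Int) ≤ py - mny),
    PySem.List.pySetD_of_nonneg _ _ (by norm_num : (0:Int) ≤ 0)]
  rw [rowOf_new mnx mny mxy px py pts (fun q hq => by have := hb q hq; omega) hpy1 hpy2]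
  rw [Int.toNat_zero, List.set_cons_zero]
  simp only [grid]
  rw [PySem.List.pyRange_one_cons (by omega : mnx - 1 < mxx + 1)]
  rw [List.map_cons, show mnx - 1 + 1 = mnx from by omega]
  congr 1
  · rw [hpx]
  · apply List.map_congr_left
    intro i hi
    rw [PySem.List.mem_pyRange_one] at hi
    exact (rowOf_away mny mxy px py i pts (by omega)).symm

lemma grid_down (mnx mxx mny mxy px py : Int) (pts : List (Int × Int))
    (hb : ∀ q ∈ pts, mnx ≤ q.1 ∧ q.1 ≤ mxx ∧ mny ≤ q.2 ∧ q.2 ≤ mxy)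
    (hxx : mnx ≤ mxx) (hpx : px = mxx + 1) (hpy1 : mny ≤ py) (hpy2 : py ≤ mxy) :
    setCell (grid mnx mxx mny mxy pts ++
        [List.replicate (mxy + 1 - mny).toNat "#"])
        (px - mnx) (py - mny)
      = grid mnx (mxx + 1) mny mxy (pts ++ [(px, py)]) := by
  rw [setCell]
  have h1 : (px - mnx).toNat = (grid mnx mxx mny mxy pts).length := by
    rw [length_grid]; omega
  rw [PySem.List.pyGetD_eq_getElem _ _ (by omega : (0:Int) ≤ px - mnx)
      (by simp [length_grid]; omega)]
  rw [List.getElem_concat_length h1,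
    PySem.List.pySetD_of_nonneg _ _ (by omega : (0:Int) ≤ py - mny),
    PySem.List.pySetD_of_nonneg _ _ (by omega : (0:Int) ≤ px - mnx),
    rowOf_new mnx mny mxy px py pts (fun q hq => by have := hb q hq; omega) hpy1 hpy2,
    h1, set_append_last]
  simp only [grid]
  rw [show mxx + 1 + 1 = (mxx + 1) + 1 from rfl,
    PySem.List.pyRange_one_succ_right (by omega : mnx ≤ mxx + 1),
    List.map_append, List.map_singleton]
  congr 1
  · apply List.map_congr_left
    intro i hi
    rw [PySem.List.mem_pyRange_one] at hi
    exact (rowOf_away mny mxy px py i pts (by omega)).symm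
  · rw [hpx]

lemma grid_left (mnx mxx mny mxy px py : Int) (pts : List (Int × Int))
    (hb : ∀ q ∈ pts, mnx ≤ q.1 ∧ q.1 ≤ mxx ∧ mny ≤ q.2 ∧ q.2 ≤ mxy)
    (hyy : mny ≤ mxy) (hpy : py = mny - 1) (hpx1 : mnx ≤ px) (hpx2 : px ≤ mxx) :
    setCell ((grid mnx mxx mny mxy pts).map (fun row => "#" :: row)) (px - mnx) 0
      = grid mnx mxx (mny - 1) mxy (pts ++ [(px, py)]) := by
  rw [setCell, grid, List.map_map,
    PySem.List.pySetD_of_nonneg _ _ (by omega : (0:Int) ≤ px - mnx)]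
  rw [pyGetD_map_pyRange_int _ _ _ _ _ (by omega) (by omega)]
  have hax : mnx + (px - mnx) = px := by omega
  rw [hax]
  rw [PySem.List.pySetD_of_nonneg _ _ (by norm_num : (0:Int) ≤ 0), Int.toNat_zero]
  simp only [Function.comp_apply, List.set_cons_zero]
  have hrow : ("." : String) :: rowOf mny mxy pts px
      = rowOf (mny - 1) mxy (pts ++ [(px, py)]) px := by
    simp only [rowOf]
    rw [PySem.List.pyRange_one_cons (by omega : mny - 1 < mxy + 1), List.map_cons]
    congr 1
    · rw [if_pos (by simp [hpy])]
    · rw [show mny - 1 + 1 = mny from by omega]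
      symm
      apply List.map_congr_left
      intro j hj
      rw [PySem.List.mem_pyRange_one] at hj
      have : (px, j) ∈ pts ++ [(px, py)] ↔ (px, j) ∈ pts := by
        simp only [List.mem_append, List.mem_singleton, Prod.mk.injEq]
        exact or_iff_left (fun h => by omega)
      simp only [this]
  rw [hrow, grid]
  apply map_pyRange_set (rowOf (mny - 1) mxy (pts ++ [(px, py)]))
    ((fun row => "#" :: row) ∘ rowOf mny mxy pts) mnx (mxx + 1) px _ (by omega) (by omega) rfl
  intro i _ _ hi
  simp only [rowOf, Function.comp_apply]
  rw [PySem.List.pyRange_one_cons (by omega : mny - 1 < mxy + 1), List.map_cons]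
  congr 1
  · rw [if_neg]
    simp only [List.mem_append, List.mem_singleton, Prod.mk.injEq]
    rintro (h | ⟨rfl, -⟩)
    · have := hb _ h; omega
    · exact hi rfl
  · rw [show mny - 1 + 1 = mny from by omega]
    apply List.map_congr_left
    intro j hj
    rw [PySem.List.mem_pyRange_one] at hj
    have : (i, j) ∈ pts ++ [(px, py)] ↔ (i, j) ∈ pts := by
      simp only [List.mem_append, List.mem_singleton, Prod.mk.injEq]
      exact or_iff_left (fun h => by omega)
    simp only [this]

lemma grid_right (mnx mxx mny mxy px py : Int) (pts : List (Int × Int))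
    (hb : ∀ q ∈ pts, mnx ≤ q.1 ∧ q.1 ≤ mxx ∧ mny ≤ q.2 ∧ q.2 ≤ mxy)
    (hyy : mny ≤ mxy) (hpy : py = mxy + 1) (hpx1 : mnx ≤ px) (hpx2 : px ≤ mxx) :
    setCell ((grid mnx mxx mny mxy pts).map (fun row => row ++ ["#"])) (px - mnx) (py - mny)
      = grid mnx mxx mny (mxy + 1) (pts ++ [(px, py)]) := by
  rw [setCell, grid, List.map_map,
    PySem.List.pySetD_of_nonneg _ _ (by omega : (0:Int) ≤ px - mnx)]
  rw [pyGetD_map_pyRange_int _ _ _ _ _ (by omega) (by omega)]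
  have hax : mnx + (px - mnx) = px := by omega
  rw [hax]
  rw [PySem.List.pySetD_of_nonneg _ _ (by omega : (0:Int) ≤ py - mny)]
  simp only [Function.comp_apply]
  have hidx : (py - mny).toNat = (rowOf mny mxy pts px).length := by
    rw [length_rowOf]; omega
  rw [hidx, set_append_last]
  have hrow : rowOf mny mxy pts px ++ ["."]
      = rowOf mny (mxy + 1) (pts ++ [(px, py)]) px := by
    simp only [rowOf]
    rw [show mxy + 1 + 1 = (mxy + 1) + 1 from rfl,
      PySem.List.pyRange_one_succ_right (by omega : mny ≤ mxy + 1),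
      List.map_append, List.map_singleton]
    congr 1
    · apply List.map_congr_left
      intro j hj
      rw [PySem.List.mem_pyRange_one] at hj
      have : (px, j) ∈ pts ++ [(px, py)] ↔ (px, j) ∈ pts := by
        simp only [List.mem_append, List.mem_singleton, Prod.mk.injEq]
        exact or_iff_left (fun h => by omega)
      simp only [this]
    · rw [if_pos (by simp [hpy])]
  rw [hrow, grid]
  apply map_pyRange_set (rowOf mny (mxy + 1) (pts ++ [(px, py)]))
    ((fun row => row ++ ["#"]) ∘ rowOf mny mxy pts) mnx (mxx + 1) px _ (by omega) (by omega) rfl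
  intro i _ _ hi
  simp only [rowOf, Function.comp_apply]
  rw [show mxy + 1 + 1 = (mxy + 1) + 1 from rfl,
    PySem.List.pyRange_one_succ_right (by omega : mny ≤ mxy + 1),
    List.map_append, List.map_singleton]
  congr 1
  · apply List.map_congr_left
    intro j hj
    rw [PySem.List.mem_pyRange_one] at hj
    have : (i, j) ∈ pts ++ [(px, py)] ↔ (i, j) ∈ pts := by
      simp only [List.mem_append, List.mem_singleton, Prod.mk.injEq]
      exact or_iff_left (fun h => by omega)
    simp only [this]
  · rw [if_neg]
    simp only [List.mem_append, List.mem_singleton, Prod.mk.injEq]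
    rintro (h | ⟨rfl, -⟩)
    · have := hb _ h; omega
    · exact hi rfl

lemma grid_in (mnx mxx mny mxy px py : Int) (pts : List (Int × Int))
    (hpx1 : mnx ≤ px) (hpx2 : px ≤ mxx) (hpy1 : mny ≤ py) (hpy2 : py ≤ mxy) :
    setCell (grid mnx mxx mny mxy pts) (px - mnx) (py - mny)
      = grid mnx mxx mny mxy (pts ++ [(px, py)]) := by
  rw [setCell, grid,
    PySem.List.pySetD_of_nonneg _ _ (by omega : (0:Int) ≤ px - mnx),
    pyGetD_map_pyRange_int _ _ _ _ _ (by omega) (by omega)]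
  have hax : mnx + (px - mnx) = px := by omega
  rw [hax]
  rw [PySem.List.pySetD_of_nonneg _ _ (by omega : (0:Int) ≤ py - mny)]
  have hrow : (rowOf mny mxy pts px).set (py - mny).toNat "."
      = rowOf mny mxy (pts ++ [(px, py)]) px := by
    simp only [rowOf]
    apply map_pyRange_set _ _ _ _ _ _ (by omega) (by omega) (by simp)
    intro z _ _ hz
    have : (px, z) ∈ pts ++ [(px, py)] ↔ (px, z) ∈ pts := by
      simp only [List.mem_append, List.mem_singleton, Prod.mk.injEq]
      exact or_iff_left (fun h => hz h.2)
    simp only [this]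
  rw [hrow, grid]
  apply map_pyRange_set (rowOf mny mxy (pts ++ [(px, py)])) (rowOf mny mxy pts)
    mnx (mxx + 1) px _ (by omega) (by omega) rfl
  intro i _ _ hi
  exact rowOf_away mny mxy px py i pts hi

lemma stepA_step (st : BState) (c : Char) (hInv : InvB st) :
    stepA (dirName st.d, st.x - st.minx, st.y - st.miny,
        grid st.minx st.maxx st.miny st.maxy st.pts) c
      = (dirName (stepB st c).d,
         (stepB st c).x - (stepB st c).minx,
         (stepB st c).y - (stepB st c).miny,
         grid (stepB st c).minx (stepB st c).maxx (stepB st c).miny (stepB st c).maxy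
           (stepB st c).pts) := by
  obtain ⟨h0, h4, hmn, hmx, hny, hxy, hmem, hb⟩ := hInv
  obtain ⟨hx1, hx2, hy1, hy2⟩ := hb _ hmem
  have hxx : st.minx ≤ st.maxx := le_trans hx1 hx2
  have hyy : st.miny ≤ st.maxy := le_trans hy1 hy2
  rw [stepB_eq st c h0 h4]
  have hd0 : 0 ≤ PySem.Int.mod (st.d + turnN c) 4 := PySem.Int.mod_nonneg _ (by norm_num)
  have hd4 : PySem.Int.mod (st.d + turnN c) 4 < 4 := PySem.Int.mod_lt _ (by norm_num)
  simp only [stepA]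
  rw [dir_step st.d c h0 h4, move_step _ hd0 hd4]
  set d' : Int := PySem.Int.mod (st.d + turnN c) 4 with hd'
  set px : Int := st.x + dxN d' with hpx
  set py : Int := st.y + dyN d' with hpy
  have hdxy : (dxN d' = 0 ∧ (dyN d' = 1 ∨ dyN d' = -1)) ∨
      (dyN d' = 0 ∧ (dxN d' = 1 ∨ dxN d' = -1)) := by
    have h : d' = 0 ∨ d' = 1 ∨ d' = 2 ∨ d' = 3 := by omega
    rcases h with h|h|h|h <;> rw [h] <;> simp [dxN, dyN]
  have fold : ∀ (g : List (List String)) (x y : Int),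
      PySem.List.pySetD g x (PySem.List.pySetD (PySem.List.pyGetD g x []) y ".")
        = setCell g x y := fun _ _ _ => rfl
  rw [show st.x - st.minx + dxN d' = px - st.minx from by omega,
    show st.y - st.miny + dyN d' = py - st.miny from by omega,
    length_grid, grid_row0_len _ _ _ _ _ hxx]
  have hRC : ((st.maxx + 1 - st.minx).toNat : Int) = st.maxx + 1 - st.minx ∧
      ((st.maxy + 1 - st.miny).toNat : Int) = st.maxy + 1 - st.miny := by omega
  split_ifs with hA hB hC hD
  -- case up: px = st.minx - 1
  · have hpxe : px = st.minx - 1 := by omega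
    have hdye : dyN d' = 0 := by rcases hdxy with ⟨h1, h2⟩ | ⟨h1, h2⟩ <;> omega
    have hpye : py = st.y := by omega
    have e1 : min st.minx px = st.minx - 1 := by rw [min_eq_right (by omega)]; omega
    have e2 : max st.maxx px = st.maxx := max_eq_left (by omega)
    have e3 : min st.miny py = st.miny := min_eq_left (by omega)
    have e4 : max st.maxy py = st.maxy := max_eq_left (by omega)
    dsimp only
    rw [e1, e2, e3, e4, fold,
      grid_up st.minx st.maxx st.miny st.maxy px py st.pts hb hxx hpxe (by omega) (by omega)]
    simp only [Prod.mk.injEq, and_true, true_and]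
    omega
  -- case down: px = st.maxx + 1
  · have hpxe : px = st.maxx + 1 := by omega
    have hdye : dyN d' = 0 := by rcases hdxy with ⟨h1, h2⟩ | ⟨h1, h2⟩ <;> omega
    have e1 : min st.minx px = st.minx := min_eq_left (by omega)
    have e2 : max st.maxx px = st.maxx + 1 := by rw [max_eq_right (by omega)]; omega
    have e3 : min st.miny py = st.miny := min_eq_left (by omega)
    have e4 : max st.maxy py = st.maxy := max_eq_left (by omega)
    dsimp only
    rw [e1, e2, e3, e4, fold,
      grid_down st.minx st.maxx st.miny st.maxy px py st.pts hb hxx hpxe (by omega) (by omega)]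
  -- case left: py = st.miny - 1
  · have hpye : py = st.miny - 1 := by omega
    have hdxe : dxN d' = 0 := by rcases hdxy with ⟨h1, h2⟩ | ⟨h1, h2⟩ <;> omega
    have hpxb : st.minx ≤ px ∧ px ≤ st.maxx := by omega
    have e1 : min st.minx px = st.minx := min_eq_left (by omega)
    have e2 : max st.maxx px = st.maxx := max_eq_left (by omega)
    have e3 : min st.miny py = st.miny - 1 := by rw [min_eq_right (by omega)]; omega
    have e4 : max st.maxy py = st.maxy := max_eq_left (by omega)
    dsimp only
    rw [e1, e2, e3, e4, fold,
      grid_left st.minx st.maxx st.miny st.maxy px py st.pts hb hyy hpye hpxb.1 hpxb.2]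
    simp only [Prod.mk.injEq, and_true, true_and]
    omega
  -- case right: py = st.maxy + 1
  · have hpye : py = st.maxy + 1 := by omega
    have hdxe : dxN d' = 0 := by rcases hdxy with ⟨h1, h2⟩ | ⟨h1, h2⟩ <;> omega
    have hpxb : st.minx ≤ px ∧ px ≤ st.maxx := by omega
    have e1 : min st.minx px = st.minx := min_eq_left (by omega)
    have e2 : max st.maxx px = st.maxx := max_eq_left (by omega)
    have e3 : min st.miny py = st.miny := min_eq_left (by omega)
    have e4 : max st.maxy py = st.maxy + 1 := by rw [max_eq_right (by omega)]; omega
    dsimp only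
    rw [e1, e2, e3, e4, fold,
      grid_right st.minx st.maxx st.miny st.maxy px py st.pts hb hyy hpye hpxb.1 hpxb.2]
  -- case inside
  · have hbx : st.minx ≤ px ∧ px ≤ st.maxx := by omega
    have hby : st.miny ≤ py ∧ py ≤ st.maxy := by omega
    have e1 : min st.minx px = st.minx := min_eq_left (by omega)
    have e2 : max st.maxx px = st.maxx := max_eq_left (by omega)
    have e3 : min st.miny py = st.miny := min_eq_left (by omega)
    have e4 : max st.maxy py = st.maxy := max_eq_left (by omega)
    dsimp only
    rw [e1, e2, e3, e4, fold,
      grid_in st.minx st.maxx st.miny st.maxy px py st.pts hbx.1 hbx.2 hby.1 hby.2]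

lemma fillB_append (mnx mny : Int) (ps : List (Int × Int)) (p : Int × Int)
    (g : List (List String)) :
    fillB mnx mny (ps ++ [p]) g
      = setCell (fillB mnx mny ps g) (p.1 - mnx) (p.2 - mny) := by
  simp [fillB, List.foldl_append, setCell]

lemma grid_nil (mnx mxx mny mxy : Int) :
    grid mnx mxx mny mxy []
      = List.replicate (mxx + 1 - mnx).toNat (List.replicate (mxy + 1 - mny).toNat "#") := by
  rw [grid, show rowOf mny mxy [] = fun _ => List.replicate (mxy + 1 - mny).toNat "#" from
    funext (fun i => by simp only [rowOf, List.not_mem_nil, if_false]; exact (rep_row _ _).symm)]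
  rw [List.map_const', PySem.List.length_pyRange_one]

lemma fill_eq (mnx mxx mny mxy : Int) (ps pts0 : List (Int × Int))
    (hbp : ∀ p ∈ ps, mnx ≤ p.1 ∧ p.1 ≤ mxx ∧ mny ≤ p.2 ∧ p.2 ≤ mxy) :
    fillB mnx mny ps (grid mnx mxx mny mxy pts0) = grid mnx mxx mny mxy (pts0 ++ ps) := by
  induction ps using List.reverseRecOn with
  | nil => simp [fillB]
  | append_singleton ps p ih =>
    obtain ⟨px, py⟩ := p
    obtain ⟨g1, g2, g3, g4⟩ := hbp (px, py) (by simp)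
    rw [fillB_append, ih (fun q hq => hbp q (by simp [hq]))]
    rw [grid_in mnx mxx mny mxy px py (pts0 ++ ps) g1 g2 g3 g4, List.append_assoc]

theorem mainA (cs : List Char) :
    cs.foldl stepA ("east", 0, 0, [["."]]) =
      (dirName (scanB cs).d, (scanB cs).x - (scanB cs).minx,
        (scanB cs).y - (scanB cs).miny,
        grid (scanB cs).minx (scanB cs).maxx (scanB cs).miny (scanB cs).maxy (scanB cs).pts) := by
  induction cs using List.reverseRecOn with
  | nil => decide
  | append_singleton cs c ih =>
    rw [List.foldl_append, List.foldl_cons, List.foldl_nil, ih, scanB_append]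
    exact stepA_step (scanB cs) c (inv_scanB cs)

theorem mainB (cs : List Char) :
    make_maze_alt (String.ofList cs)
      = grid (scanB cs).minx (scanB cs).maxx (scanB cs).miny (scanB cs).maxy (scanB cs).pts := by
  have inv := inv_scanB cs
  obtain ⟨-, -, -, -, -, -, -, hb⟩ := inv
  show fillB _ _ _ _ = _
  have hlist : (String.ofList cs).toList = cs := by simp
  rw [hlist]
  rw [show (scanB cs).maxx - (scanB cs).minx + 1 = (scanB cs).maxx + 1 - (scanB cs).minx from by ring,
    show (scanB cs).maxy - (scanB cs).miny + 1 = (scanB cs).maxy + 1 - (scanB cs).miny from by ring,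
    ← grid_nil, fill_eq _ _ _ _ _ _ hb]
  simp

theorem make_maze_eq (line : String) : make_maze line = make_maze_alt line := by
  have h1 := mainA line.toList
  have h2 := mainB line.toList
  have : String.ofList line.toList = line := by simp
  rw [this] at h2
  rw [make_maze, h1, h2]


-- ===== VERDICT (by name: the statement is the Claim_ definition above) =====
theorem make_maze_spec : Claim_equal_make_maze := fun line _ => make_maze_eq line
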